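-- pv_equiv track=rewrite | github.com/plasticuproject/dynamic_programming_course | all_construct_memoization.py | all_construct
-- ===== SOURCE A (Python) =====
-- from typing import List, Dict, Optional, Tuple
--
-- def all_construct(target: str, word_bank: List[str]) -> List[List[str]]:
--     """Recursive method for solving problem using no caching
--     or memoization."""
--     construct_list: List[List[str]] = list()
--     if target == "":
--         return [[]]
--     for word in word_bank:
--         if target.startswith(word):
--             new_word: str = target[len(word):]
--             construct: List[List[str]] = all_construct(new_word, word_bank)
--             constructs: List[List[str]] = [[word] + i for i in construct]
--             construct_list += constructs
--     return construct_list
-- ===== SOURCE B (Python) =====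
-- def all_construct(target, word_bank):
--     """Bottom-up DP over suffix positions: table[i] holds all constructions
--     of target[i:], built from the end; each suffix subproblem is computed once."""
--     n = len(target)
--     table = [None] * (n + 1)
--     table[n] = [[]]
--     for i in range(n - 1, -1, -1):
--         rows = []
--         for word in word_bank:
--             j = i + len(word)
--             if j <= n and target[i:j] == word:
--                 rows += [[word] + rest for rest in table[j]]
--         table[i] = rows
--     return table[0]
-- ===== Notes on version B (the rewrite author's own statement) =====
-- stated objective: alternative
-- what changed: Replaces A's top-down recursion over suffix strings (recomputing each suffix subproblem on every visit) with a bottom-up dynamic-programming table indexed by suffix position, filled once from the end of the target.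
import Mathlib
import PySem

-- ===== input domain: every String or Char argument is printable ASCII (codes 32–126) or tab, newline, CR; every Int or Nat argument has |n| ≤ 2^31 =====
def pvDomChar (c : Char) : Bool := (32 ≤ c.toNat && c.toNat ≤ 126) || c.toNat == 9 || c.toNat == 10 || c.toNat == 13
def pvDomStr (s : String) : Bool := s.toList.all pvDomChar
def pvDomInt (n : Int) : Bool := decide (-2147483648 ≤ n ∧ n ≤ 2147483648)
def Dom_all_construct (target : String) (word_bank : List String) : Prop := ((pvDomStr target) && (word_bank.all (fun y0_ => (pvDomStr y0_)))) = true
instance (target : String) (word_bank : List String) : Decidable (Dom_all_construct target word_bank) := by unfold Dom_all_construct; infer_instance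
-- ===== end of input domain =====

-- B is a bottom-up dynamic program over suffix positions (each suffix subproblem
-- computed once) instead of A's top-down recursion over suffix strings, which
-- recomputes subproblems; return values are identical on Pre_.

-- ===== PORT A =====
-- fuel only makes A's recursion total in Lean; under Pre_ every recursive call
-- strictly shortens the target, so fuel = length+1 is never exhausted.
def all_construct_go (fuel : Nat) (target : List Char) (word_bank : List String) : List (List String) :=
  match fuel with
  | 0 => []
  | fuel + 1 =>
    if target = [] then [[]]
    else
      word_bank.foldl (fun construct_list word =>
        if PySem.Chars.startswith target word.toList then
          construct_list ++
            (all_construct_go fuel (target.drop word.toList.length) word_bank).map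
              (fun i => word :: i)
        else construct_list) []

def all_construct (target : String) (word_bank : List String) : List (List String) :=
  all_construct_go (target.toList.length + 1) target.toList word_bank

-- ===== PORT B =====
def all_construct_alt (target : String) (word_bank : List String) : List (List String) :=
  let cs := target.toList
  let n := cs.length
  -- table kept as a list whose head is the row for the lowest position filled so far
  let table := (List.range n).foldl
    (fun tbl k =>
      let i := n - 1 - k
      (word_bank.foldl (fun rows word =>
        let w := word.toList
        if i + w.length ≤ n ∧ (cs.drop i).take w.length = w then
          rows ++ (tbl.getD (w.length - 1) []).map (fun rest => word :: rest)
        else rows) []) :: tbl)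
    [[[]]]
  table.getD 0 []

-- ===== PRECONDITION & SPEC =====
-- Pre_ excludes the inputs where A never returns: an empty word in the bank with a
-- nonempty target makes A recurse forever (RecursionError); B raises TypeError there too.
def Pre_all_construct (target : String) (word_bank : List String) : Prop :=
  target = "" ∨ "" ∉ word_bank
instance (target : String) (word_bank : List String) : Decidable (Pre_all_construct target word_bank) := by unfold Pre_all_construct; infer_instance

def pvWitness_all_construct : String × List String := ("abcdef", ["ab", "abc", "cd", "def", "abcd", "ef", "c"])

def Spec_all_construct (target : String) (word_bank : List String) (out : List (List String)) : Prop := out = all_construct_alt target word_bank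
instance (target : String) (word_bank : List String) (out : List (List String)) : Decidable (Spec_all_construct target word_bank out) := by unfold Spec_all_construct; infer_instance

-- ===== CLAIM (what is proved, stated in full; the proofs are below) =====
def Claim_equal_all_construct : Prop := ∀ (target : String) (word_bank : List String), Dom_all_construct target word_bank → Pre_all_construct target word_bank → Spec_all_construct target word_bank (all_construct target word_bank)

-- ===== LEMMAS AND PROOFS =====

-- fuel irrelevance for A's recursion, given no empty word in the bank
lemma go_fuel (word_bank : List String) (hwb : ∀ w ∈ word_bank, w.toList ≠ []) :
    ∀ (f1 : Nat) (cs : List Char) (f2 : Nat), cs.length < f1 → cs.length < f2 →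
      all_construct_go f1 cs word_bank = all_construct_go f2 cs word_bank := by
  intro f1
  induction f1 with
  | zero => intro cs f2 h1 _; omega
  | succ f1 ih =>
    intro cs f2 h1 h2
    match f2, h2 with
    | f2 + 1, h2 =>
      simp only [all_construct_go]
      by_cases hcs : cs = []
      · simp [hcs]
      · simp only [if_neg hcs]
        refine PySem.List.foldl_congr_mem _ _ _ _ ?_
        intro acc w hw
        by_cases hs : PySem.Chars.startswith cs w.toList
        · simp only [if_pos hs]
          have hpre : w.toList <+: cs := (PySem.Chars.startswith_iff _ _).mp hs
          have hlen : w.toList.length ≤ cs.length := hpre.length_le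
          have hne : w.toList ≠ [] := hwb w hw
          have hpos : 0 < w.toList.length := List.length_pos_iff.mpr hne
          have hd : (cs.drop w.toList.length).length < f1 := by
            rw [List.length_drop]; omega
          have hd2 : (cs.drop w.toList.length).length < f2 := by
            rw [List.length_drop]; omega
          rw [ih (cs.drop w.toList.length) f2 hd hd2]
        · simp [hs]


-- the table invariant of B's fold: after k steps the table holds A's results
-- for the suffixes at positions n-k .. n
lemma alt_invariant (word_bank : List String) (hwb : ∀ w ∈ word_bank, w.toList ≠ [])
    (cs : List Char) :
    ∀ k, k ≤ cs.length →
      (List.range k).foldl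
        (fun tbl j =>
          (word_bank.foldl (fun rows word =>
            if cs.length - 1 - j + word.toList.length ≤ cs.length ∧
               (cs.drop (cs.length - 1 - j)).take word.toList.length = word.toList then
              rows ++ (tbl.getD (word.toList.length - 1) []).map (fun rest => word :: rest)
            else rows) []) :: tbl)
        [[[]]]
      = (List.range (k + 1)).map
          (fun d => all_construct_go (cs.length + 1) (cs.drop (cs.length - k + d)) word_bank) := by
  intro k
  induction k with
  | zero =>
    intro _
    simp [all_construct_go]
  | succ k ih =>
    intro hk
    have hk' : k ≤ cs.length := by omega
    rw [List.range_succ, List.foldl_append, ih hk']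
    set n := cs.length with hn
    set i := n - 1 - k with hi
    have hilt : i < n := by omega
    have hdroplen : (cs.drop i).length = n - i := by rw [List.length_drop]
    have hdropne : cs.drop i ≠ [] := by
      intro h
      have := congrArg List.length h
      simp [hdroplen] at this
      omega
    -- RHS restructure
    have hrhs : (List.range (k + 1 + 1)).map
          (fun d => all_construct_go (n + 1) (cs.drop (n - (k + 1) + d)) word_bank)
        = all_construct_go (n + 1) (cs.drop i) word_bank ::
          (List.range (k + 1)).map
            (fun d => all_construct_go (n + 1) (cs.drop (n - k + d)) word_bank) := by
      rw [List.range_succ_eq_map, List.map_cons, List.map_map]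
      congr 1
      · have h0 : n - (k + 1) + 0 = i := by omega
        rw [h0]
      · refine List.map_congr_left ?_
        intro d hd
        simp only [Function.comp]
        congr 2
        omega
    rw [hrhs]
    simp only [List.foldl_cons, List.foldl_nil]
    rw [← hi]
    congr 1
    -- the new row equals A's recursion on the suffix at position i
    conv_rhs => rw [show all_construct_go (n+1) (cs.drop i) word_bank =
      word_bank.foldl (fun construct_list word =>
        if PySem.Chars.startswith (cs.drop i) word.toList then
          construct_list ++
            (all_construct_go n ((cs.drop i).drop word.toList.length) word_bank).map
              (fun r => word :: r)
        else construct_list) [] from by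
        simp only [all_construct_go]; rw [if_neg hdropne]]
    refine PySem.List.foldl_congr_mem _ _ _ _ ?_
    intro acc word hword
    have hne : word.toList ≠ [] := hwb word hword
    have hpos : 0 < word.toList.length := List.length_pos_iff.mpr hne
    by_cases hs : PySem.Chars.startswith (cs.drop i) word.toList
    · have hpre : word.toList <+: cs.drop i := (PySem.Chars.startswith_iff _ _).mp hs
      have hlen : word.toList.length ≤ n - i := by
        have := hpre.length_le; omega
      have hcond : i + word.toList.length ≤ n ∧
          (cs.drop i).take word.toList.length = word.toList := by
        refine ⟨by omega, ?_⟩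
        exact (List.prefix_iff_eq_take.mp hpre).symm
      rw [if_pos hcond, if_pos hs]
      congr 1
      have hdlt : word.toList.length - 1 < k + 1 := by omega
      have hgetd : (List.map (fun d => all_construct_go (n + 1) (cs.drop (n - k + d)) word_bank)
            (List.range (k + 1))).getD (word.toList.length - 1) []
          = all_construct_go (n + 1) (cs.drop (n - k + (word.toList.length - 1))) word_bank := by
        rw [List.getD_eq_getElem?_getD, List.getElem?_map, List.getElem?_range hdlt]
        rfl
      rw [hgetd, List.drop_drop]
      have hidx : n - k + (word.toList.length - 1) = i + word.toList.length := by omega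
      rw [hidx]
      congr 1
      apply go_fuel word_bank hwb
      · rw [List.length_drop]; omega
      · rw [List.length_drop]; omega
    · rw [if_neg hs]
      rw [if_neg ?_]
      intro hcond
      apply hs
      rw [PySem.Chars.startswith_iff]
      exact hcond.2 ▸ List.take_prefix _ _

lemma toList_ne_nil_of_mem (word_bank : List String) (h : "" ∉ word_bank) :
    ∀ w ∈ word_bank, w.toList ≠ [] := by
  intro w hw hnil
  apply h
  have h2 := congrArg String.ofList hnil
  simp only [String.ofList_toList] at h2
  subst h2
  exact hw

-- ===== VERDICT (by name: the statement is the Claim_ definition above) =====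
theorem all_construct_spec : Claim_equal_all_construct := by
  intro target word_bank _ hpre
  unfold Spec_all_construct
  rcases hpre with h | h
  · subst h
    simp [all_construct, all_construct_alt, all_construct_go]
  · have hwb := toList_ne_nil_of_mem word_bank h
    have hinv := alt_invariant word_bank hwb target.toList target.toList.length le_rfl
    simp only [all_construct, all_construct_alt]
    rw [hinv]
    rw [List.getD_eq_getElem?_getD, List.getElem?_map,
        List.getElem?_range (by omega : 0 < target.toList.length + 1)]
    simp
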